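-- pv_equiv track=rewrite | github.com/KaramAlrasam/implementationsFunction | corp_name_of_email.py | corp_name
-- ===== SOURCE A (Python) =====
-- from string import punctuation
--
-- def corp_name(str1:str)->str:
--   """It is in charge to corp the name from the email"""
--   #make condition if the email doesn't have @ raise error
--   if "@" not in str1:
--     raise ValueError ("The email is missed @")
--   index=str1.index("@")
--   name=str1[:index]
--   for s in punctuation:
--     name=name.replace(s,"")
--   return name
-- ===== SOURCE B (Python) =====
-- from string import punctuation
--
-- def corp_name(str1: str) -> str:
--     """It is in charge to corp the name from the email"""
--     if "@" not in str1:
--         raise ValueError("The email is missed @")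
--     name = str1[:str1.index("@")]
--     punct = set(punctuation)
--     return "".join(c for c in name if c not in punct)
-- ===== Notes on version B (the rewrite author's own statement) =====
-- stated objective: idiomatic
-- what changed: Instead of 32 full scans of the name (one replace per punctuation character), B makes a single pass over the name keeping characters not in a punctuation set.
import Mathlib
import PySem

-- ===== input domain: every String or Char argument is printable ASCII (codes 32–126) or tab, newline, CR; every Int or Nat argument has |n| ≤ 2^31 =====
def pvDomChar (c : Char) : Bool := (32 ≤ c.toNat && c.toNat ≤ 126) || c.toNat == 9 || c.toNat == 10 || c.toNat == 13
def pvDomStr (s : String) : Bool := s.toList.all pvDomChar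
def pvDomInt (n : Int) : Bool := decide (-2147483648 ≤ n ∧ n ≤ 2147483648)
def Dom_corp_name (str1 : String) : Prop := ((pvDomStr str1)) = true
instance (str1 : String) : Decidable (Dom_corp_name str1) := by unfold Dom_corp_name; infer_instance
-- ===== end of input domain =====

-- B replaces A's 32 whole-string replace passes (one per punctuation char) by a single
-- filtering pass over the name with a set-membership test (objective: idiomatic).

-- string.punctuation
def pvPunct : String := "!\"#$%&'()*+,-./:;<=>?@[\\]^_`{|}~"

-- ===== PORT A =====
def corp_name (str1 : String) : String :=
  let index := PySem.Str.find str1 "@"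
  let name := PySem.Str.slice str1 none (some index)
  pvPunct.toList.foldl (fun m s => PySem.Str.replace m (String.ofList [s]) "") name

-- ===== PORT B =====
def corp_name_alt (str1 : String) : String :=
  let name := PySem.Str.slice str1 none (some (PySem.Str.find str1 "@"))
  let punct : PySem.Set Char := PySem.Set.ofList pvPunct.toList
  String.ofList (name.toList.filter (fun c => !(PySem.Set.contains punct c)))

-- ===== PRECONDITION & SPEC =====
-- A raises ValueError when "@" is not in str1; Pre_ admits exactly the inputs where A returns.
def Pre_corp_name (str1 : String) : Prop := PySem.Str.isIn "@" str1 = true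
instance (str1 : String) : Decidable (Pre_corp_name str1) := by unfold Pre_corp_name; infer_instance
def pvWitness_corp_name : String := "john.doe@x.com"

def Spec_corp_name (str1 : String) (out : String) : Prop := out = corp_name_alt str1
instance (str1 : String) (out : String) : Decidable (Spec_corp_name str1 out) := by unfold Spec_corp_name; infer_instance

-- ===== CLAIM (what is proved, stated in full; the proofs are below) =====
def Claim_equal_corp_name : Prop := ∀ (str1 : String), Dom_corp_name str1 → Pre_corp_name str1 → Spec_corp_name str1 (corp_name str1)

-- ===== LEMMAS AND PROOFS =====

-- Chars.replace.go with a one-char pattern and empty replacement is a filter.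
theorem go_filter (c : Char) : ∀ (fuel : Nat) (l acc : List Char), l.length ≤ fuel →
    PySem.Chars.replace.go [c] [] fuel l acc = acc.reverse ++ l.filter (· ≠ c) := by
  intro fuel
  induction fuel with
  | zero =>
    intro l acc h
    cases l with
    | nil => simp [PySem.Chars.replace.go]
    | cons a b => simp at h
  | succ n ih =>
    intro l acc h
    cases l with
    | nil => simp [PySem.Chars.replace.go]
    | cons c' t =>
      by_cases hc : c = c'
      · subst hc
        rw [PySem.Chars.replace.go]
        simp [List.isPrefixOf, ih t acc (by simpa using h)]
      · rw [PySem.Chars.replace.go]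
        simp [List.isPrefixOf, hc, ih t (c'::acc) (by simpa using h), Ne.symm hc]

-- name.replace(c, "") deletes every occurrence of the character c.
theorem replace_single (n : String) (c : Char) :
    PySem.Str.replace n (String.ofList [c]) "" = String.ofList (n.toList.filter (· ≠ c)) := by
  simp [PySem.Str.replace, PySem.Chars.replace]
  rw [go_filter c n.length n.toList [] (by simp)]
  simp

-- A's loop of per-character replaces equals one filter against the whole list.
theorem foldl_replace_eq_filter (cs : List Char) (n : String) :
    cs.foldl (fun m c => PySem.Str.replace m (String.ofList [c]) "") n
      = String.ofList (n.toList.filter (fun x => !(cs.contains x))) := by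
  induction cs generalizing n with
  | nil => simp
  | cons c cs ih =>
    rw [List.foldl_cons, ih, replace_single]
    congr 1
    simp [List.filter_filter]
    apply List.filter_congr
    intro x _
    by_cases h : x = c <;> simp [h]

theorem set_contains_eq (x : Char) :
    PySem.Set.contains (PySem.Set.ofList pvPunct.toList) x = pvPunct.toList.contains x := by
  by_cases h : x ∈ pvPunct.toList <;>
    simp [PySem.Set.contains_eq_listContains, PySem.Set.mem_ofList, h]

-- ===== VERDICT (by name: the statement is the Claim_ definition above) =====
theorem corp_name_spec : Claim_equal_corp_name := by
  intro str1 _ _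
  unfold Spec_corp_name corp_name corp_name_alt
  rw [foldl_replace_eq_filter]
  simp only [set_contains_eq]
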